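-- pv_equiv track=rewrite | github.com/s-m-kashani98/doubleRemover | doubleRemover.py | double_remover
-- ===== SOURCE A (Python) =====
-- def double_remover(input):
--     cnt = 0
--     remove_index = []
--     ############ indexes of the string that are double letters ##########
--     for i in range(len(input)-1):
--         if input[i] == input[i+1]:
--             cnt += 1
--         else:
--             if cnt == 1:
--                 remove_index.append(i)
--                 remove_index.append(i-1)
--             cnt = 0
--     if cnt == 1:
--                 remove_index.append(i)
--                 remove_index.append(i+1)
--     #####################################################################
--     temp  = ''
--     for i in range(len(input)):
--         if not i in remove_index:
--             temp += input[i]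
--     return temp
-- ===== SOURCE B (Python) =====
-- from itertools import groupby
--
-- def double_remover(input):
--     out = []
--     for _, grp in groupby(input):
--         run = ''.join(grp)
--         if len(run) != 2:
--             out.append(run)
--     return ''.join(out)
-- ===== Notes on version B (the rewrite author's own statement) =====
-- stated objective: faster
-- what changed: Replaces A's two-pass scheme (collect removal indices from adjacent comparisons, then rebuild by a per-character membership test in the removal list) with a single pass over maximal equal-character runs via itertools.groupby, keeping every run whose length is not exactly 2.
import Mathlib
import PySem

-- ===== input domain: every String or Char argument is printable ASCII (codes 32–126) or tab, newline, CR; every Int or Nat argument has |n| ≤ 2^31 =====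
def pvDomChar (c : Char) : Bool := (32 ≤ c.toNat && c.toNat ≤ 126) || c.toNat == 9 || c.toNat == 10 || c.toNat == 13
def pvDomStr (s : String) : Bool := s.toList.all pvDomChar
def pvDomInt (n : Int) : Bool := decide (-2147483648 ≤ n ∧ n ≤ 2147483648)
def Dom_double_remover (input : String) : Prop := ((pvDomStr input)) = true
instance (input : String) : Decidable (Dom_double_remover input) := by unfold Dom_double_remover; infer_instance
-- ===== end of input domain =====

-- B replaces A's two-pass scheme (collect removal indices via adjacent comparisons, then rebuild
-- the string with a per-index membership test) by a single pass over maximal equal-character runs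
-- (itertools.groupby), keeping every run whose length is not exactly 2; objective: faster
-- (A re-scans its removal-index list for every character; a timing run measured B faster).

-- ===== PORT A =====
-- Note on the trailing branch: Python's post-loop `if cnt == 1` uses the loop variable i, which
-- at that point equals len(input)-2 (the branch is only reachable when the loop ran, i.e.
-- len(input) >= 2); we write len(input)-2 / len(input)-1 directly.
def double_remover (input : String) : String :=
  let s := input.toList
  let n : Int := PySem.Str.len input
  let st :=
    (PySem.List.pyRange 0 (n - 1) 1).foldl
      (fun (st : Int × List Int) i =>
        if PySem.List.pyGetD s i ' ' == PySem.List.pyGetD s (i + 1) ' ' then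
          (st.1 + 1, st.2)
        else
          (0, if st.1 == 1 then st.2 ++ [i, i - 1] else st.2))
      (0, ([] : List Int))
  let ri := if st.1 == 1 then st.2 ++ [n - 2, n - 1] else st.2
  String.mk
    ((PySem.List.pyRange 0 n 1).foldl
      (fun t i => if !(ri.contains i) then t ++ [PySem.List.pyGetD s i ' '] else t)
      ([] : List Char))

-- ===== PORT B =====
-- port of Source B: iterate over the maximal runs of equal characters (itertools.groupby, rendered
-- as takeWhile/dropWhile recursion), keep a run unless its length is exactly 2, join the runs.
def drGo : List Char → List Char
  | [] => []
  | c :: t =>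
    let run := c :: t.takeWhile (· == c)
    (if run.length = 2 then [] else run) ++ drGo (t.dropWhile (· == c))
termination_by s => s.length
decreasing_by
  simp only [List.length_cons]
  have := List.length_dropWhile_le (· == c) t
  omega

def double_remover_alt (input : String) : String := String.mk (drGo input.toList)

-- ===== PRECONDITION & SPEC =====
def Spec_double_remover (input : String) (out : String) : Prop := out = double_remover_alt input
instance (input : String) (out : String) : Decidable (Spec_double_remover input out) := by unfold Spec_double_remover; infer_instance

-- ===== CLAIM (what is proved, stated in full; the proofs are below) =====
def Claim_equal_double_remover : Prop := ∀ (input : String), Dom_double_remover input → Spec_double_remover input (double_remover input)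

-- ===== LEMMAS AND PROOFS =====

def loop1 : List Char → Int → Int → List Int → Int × List Int
  | a :: b :: t, i, cnt, ri =>
    if a == b then loop1 (b :: t) (i + 1) (cnt + 1) ri
    else loop1 (b :: t) (i + 1) 0 (if cnt == 1 then ri ++ [i, i - 1] else ri)
  | _, _, cnt, ri => (cnt, ri)

theorem loop1_prefix : ∀ (u : List Char) (i cnt : Int) (pre q : List Int),
    loop1 u i cnt (pre ++ q) = ((loop1 u i cnt q).1, pre ++ (loop1 u i cnt q).2)
  | [], _, _, _, _ => by simp [loop1]
  | [a], _, _, _, _ => by simp [loop1]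
  | a :: b :: t, i, cnt, pre, q => by
    simp only [loop1]
    split
    · exact loop1_prefix (b :: t) (i+1) (cnt+1) pre q
    · split
      · rw [List.append_assoc]
        exact loop1_prefix (b :: t) (i+1) 0 pre (q ++ [i, i-1])
      · exact loop1_prefix (b :: t) (i+1) 0 pre q

theorem loop1_shift : ∀ (u : List Char) (i δ cnt : Int) (ri : List Int),
    loop1 u (i + δ) cnt (ri.map (· + δ)) =
      ((loop1 u i cnt ri).1, (loop1 u i cnt ri).2.map (· + δ))
  | [], _, _, _, _ => by simp [loop1]
  | [a], _, _, _, _ => by simp [loop1]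
  | a :: b :: t, i, δ, cnt, ri => by
    simp only [loop1]
    rw [show i + δ + 1 = i + 1 + δ by ring]
    split
    · exact loop1_shift (b :: t) (i+1) δ (cnt+1) ri
    · split
      · have h : (ri ++ [i, i - 1]).map (· + δ) = ri.map (· + δ) ++ [i + δ, i + δ - 1] := by
          simp; ring_nf
        rw [← h]
        exact loop1_shift (b :: t) (i+1) δ 0 (ri ++ [i, i-1])
      · exact loop1_shift (b :: t) (i+1) δ 0 ri

theorem loop1_abs (u : List Char) (i cnt : Int) (pre : List Int) :
    loop1 u i cnt pre = ((loop1 u 0 cnt []).1, pre ++ (loop1 u 0 cnt []).2.map (· + i)) := by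
  have h1 := loop1_prefix u i cnt pre []
  simp at h1
  have h2 := loop1_shift u 0 i cnt []
  simp at h2
  rw [h1, h2]

theorem loop1_replicate (c : Char) : ∀ (m : Nat) (i cnt : Int) (ri : List Int),
    loop1 (List.replicate (m + 1) c) i cnt ri = (cnt + ↑m, ri)
  | 0, i, cnt, ri => by simp [loop1]
  | Nat.succ m, i, cnt, ri => by
    rw [List.replicate_succ, List.replicate_succ]
    simp only [loop1, BEq.rfl, if_true]
    rw [← List.replicate_succ]
    rw [loop1_replicate c m (i+1) (cnt+1) ri]
    push_cast; ring_nf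

theorem loop1_run_step (c b : Char) (r2 : List Char) (hb : (c == b) = false) :
    ∀ (m : Nat) (i cnt : Int) (ri : List Int),
      loop1 (List.replicate (m + 1) c ++ b :: r2) i cnt ri =
        loop1 (b :: r2) (i + ↑m + 1) 0
          (if cnt + ↑m == 1 then ri ++ [i + ↑m, i + ↑m - 1] else ri)
  | 0, i, cnt, ri => by
    have e : List.replicate (0 + 1) c ++ b :: r2 = c :: b :: r2 := by simp
    rw [e]
    simp only [loop1, hb, Bool.false_eq_true, if_false]
    norm_num
  | Nat.succ m, i, cnt, ri => by
    have e : List.replicate (m + 1 + 1) c ++ b :: r2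
        = c :: c :: (List.replicate m c ++ b :: r2) := by
      simp [List.replicate_succ]
    rw [e]
    simp only [loop1, BEq.rfl, if_true]
    rw [show (c :: (List.replicate m c ++ b :: r2))
        = List.replicate (m + 1) c ++ b :: r2 by simp [List.replicate_succ]]
    rw [loop1_run_step c b r2 hb m (i + 1) (cnt + 1) ri]
    rw [show i + 1 + ↑m = i + (↑(m + 1) : Int) by push_cast; ring]
    rw [show cnt + 1 + ↑m = cnt + (↑(m + 1) : Int) by push_cast; ring]

theorem fold_eq_loop1 (full : List Char) :
    ∀ (u : List Char) (a : Int) (cnt : Int) (ri : List Int),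
      (∀ k : Nat, k ≤ u.length → PySem.List.pyGetD full (a + ↑k) ' ' = u.getD k ' ') →
      (PySem.List.pyRange a (a + ↑u.length - 1) 1).foldl
        (fun (st : Int × List Int) i =>
          if PySem.List.pyGetD full i ' ' == PySem.List.pyGetD full (i + 1) ' ' then
            (st.1 + 1, st.2)
          else
            (0, if st.1 == 1 then st.2 ++ [i, i - 1] else st.2))
        (cnt, ri) = loop1 u a cnt ri
  | [], a, cnt, ri, _ => by
    rw [PySem.List.pyRange_one_eq_nil (by simp)]
    simp [loop1]
  | [x], a, cnt, ri, _ => by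
    rw [PySem.List.pyRange_one_eq_nil (by simp)]
    simp [loop1]
  | x :: y :: t, a, cnt, ri, h => by
    rw [PySem.List.pyRange_one_cons (by simp; omega)]
    simp only [List.foldl_cons]
    have h0 : PySem.List.pyGetD full a ' ' = x := by
      have := h 0 (by simp); simpa using this
    have h1 : PySem.List.pyGetD full (a + 1) ' ' = y := by
      have := h 1 (by simp); simpa using this
    rw [h0, h1]
    have hrec : ∀ (cnt' : Int) (ri' : List Int),
        (PySem.List.pyRange (a + 1) (a + ↑(x :: y :: t).length - 1) 1).foldl
          (fun (st : Int × List Int) i =>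
            if PySem.List.pyGetD full i ' ' == PySem.List.pyGetD full (i + 1) ' ' then
              (st.1 + 1, st.2)
            else
              (0, if st.1 == 1 then st.2 ++ [i, i - 1] else st.2))
          (cnt', ri') = loop1 (y :: t) (a + 1) cnt' ri' := by
      intro cnt' ri'
      have hb : a + ↑(x :: y :: t).length - 1 = (a + 1) + ↑(y :: t).length - 1 := by
        simp; ring
      rw [hb]
      exact fold_eq_loop1 full (y :: t) (a + 1) cnt' ri' (by
        intro k hk
        have := h (k + 1) (by simpa using hk)
        rw [show a + 1 + (↑k : Int) = a + ↑(k + 1) by push_cast; ring]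
        simpa using this)
    by_cases hxy : x = y
    · simp only [hxy, BEq.rfl, if_true, loop1]
      exact hrec (cnt + 1) ri
    · have hbe : (x == y) = false := by simp [hxy]
      simp only [hbe, Bool.false_eq_true, if_false, loop1]
      exact hrec 0 (if cnt == 1 then ri ++ [a, a - 1] else ri)
theorem drop_head_false (p : Char → Bool) : ∀ (t : List Char) (b : Char) (r2 : List Char), t.dropWhile p = b :: r2 → p b = false
  | [], b, r2, h => by simp at h
  | a :: t, b, r2, h => by
    rw [List.dropWhile_cons] at h
    split at h
    · exact drop_head_false p t b r2 h
    · injection h with h1 h2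
      subst h1
      simpa using ‹¬ p a = true›

theorem take_repl (c : Char) (t : List Char) :
    c :: t = List.replicate ((t.takeWhile (· == c)).length + 1) c ++ t.dropWhile (· == c) := by
  have h1 : t.takeWhile (· == c) = List.replicate (t.takeWhile (· == c)).length c := by
    rw [List.eq_replicate_iff]
    refine ⟨rfl, fun b hb => ?_⟩
    simpa using List.mem_takeWhile_imp hb
  conv_lhs => rw [← List.takeWhile_append_dropWhile (p := (· == c)) (l := t)]
  rw [List.replicate_succ, h1]
  simp

def riA (s : List Char) : List Int :=
  let st := loop1 s 0 0 []
  if st.1 == 1 then st.2 ++ [(s.length : Int) - 2, (s.length : Int) - 1] else st.2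

theorem riA_nil : riA [] = [] := by decide

theorem riA_cons_list (c : Char) (t : List Char) :
    riA (c :: t) =
      (if (t.takeWhile (· == c)).length = 1 then
          (if t.dropWhile (· == c) = [] then [(0 : Int), 1] else [(1 : Int), 0])
        else [])
      ++ (riA (t.dropWhile (· == c))).map
          (· + (((t.takeWhile (· == c)).length + 1 : Nat) : Int)) := by
  have hdecomp := take_repl c t
  rcases hrest : t.dropWhile (· == c) with _ | ⟨b, r2⟩ <;> rw [hrest] at hdecomp
  · -- string is a single run
    simp only [List.append_nil] at hdecomp
    generalize hLg : (t.takeWhile (· == c)).length = L at hdecomp ⊢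
    have hlen : (c :: t).length = L + 1 := by rw [hdecomp]; simp
    have hloop : loop1 (c :: t) 0 0 [] = ((L : Int), []) := by
      rw [hdecomp, loop1_replicate c L 0 0]
      simp
    by_cases h1 : L = 1
    · subst h1
      simp [riA, hloop, hlen, loop1]
    · have hne : ((L : Int) == 1) = false := by simp; omega
      simp [riA, hloop, hne, loop1, h1]
  · -- a different character follows the first run
    have hb : (c == b) = false := by
      have := drop_head_false (· == c) t b r2 hrest
      simp at this ⊢
      exact fun h => this h.symm
    generalize hLg : (t.takeWhile (· == c)).length = L at hdecomp ⊢
    have hlen : (c :: t).length = (L + 1) + (b :: r2).length := by rw [hdecomp]; simp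
    have hloop : loop1 (c :: t) 0 0 [] =
        ((loop1 (b :: r2) 0 0 []).1,
          (if ((L : Int) == 1) = true then [(L : Int), (L : Int) - 1] else []) ++
            (loop1 (b :: r2) 0 0 []).2.map (· + ((L : Int) + 1))) := by
      rw [hdecomp, loop1_run_step c b r2 hb L 0 0 []]
      rw [loop1_abs]
      norm_num
    have hLcast : ((L + 1 : Nat) : Int) = (L : Int) + 1 := by push_cast; ring
    simp only [riA, hloop, hlen, hLcast]
    set st := loop1 (b :: r2) 0 0 [] with hst
    by_cases hL1 : L = 1 <;> by_cases h1 : st.1 = 1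
    · subst hL1
      simp [h1]
      omega
    · subst hL1
      have h1f : (st.1 == 1) = false := by simp [h1]
      simp [h1f]
    · have hLf : ((L : Int) == 1) = false := by simp; omega
      simp [h1, hLf, hL1]
      omega
    · have hLf : ((L : Int) == 1) = false := by simp; omega
      have h1f : (st.1 == 1) = false := by simp [h1]
      simp [h1f, hLf, hL1]


def keepA (s : List Char) : List Char :=
  ((List.range s.length).filter (fun (k : Nat) => !((riA s).contains ((k : Int))))).map
    (fun k => s.getD k ' ')

theorem main_invariant : ∀ (n : Nat) (s : List Char), s.length ≤ n →
    (∀ x ∈ riA s, 0 ≤ x ∧ x < (s.length : Int)) ∧ keepA s = drGo s := by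
  intro n
  induction n with
  | zero =>
    intro s hs
    have : s = [] := List.eq_nil_of_length_eq_zero (by omega)
    subst this
    exact ⟨by simp [riA_nil], by simp [keepA, drGo]⟩
  | succ n IH =>
    intro s hs
    match s with
    | [] => exact ⟨by simp [riA_nil], by simp [keepA, drGo]⟩
    | c :: t =>
      -- abbreviations
      have hsum : (t.takeWhile (· == c)).length + (t.dropWhile (· == c)).length = t.length := by
        have h := congrArg List.length (List.takeWhile_append_dropWhile (p := (· == c)) (l := t))
        rwa [List.length_append] at h
      have hrest_le : (t.dropWhile (· == c)).length ≤ n := by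
        have := List.length_dropWhile_le (· == c) t
        simp at hs
        omega
      obtain ⟨IHbound, IHkeep⟩ := IH (t.dropWhile (· == c)) hrest_le
      generalize hLg : (t.takeWhile (· == c)).length = L at *
      set rest := t.dropWhile (· == c) with hrestdef
      have hlen : (c :: t).length = (L + 1) + rest.length := by simp; omega
      have hcast : ((L + 1 : Nat) : Int) = (L : Int) + 1 := by push_cast; ring
      have hcons := riA_cons_list c t
      rw [hLg, ← hrestdef, hcast] at hcons
      -- bound part
      have hbound : ∀ x ∈ riA (c :: t), 0 ≤ x ∧ x < ((c :: t).length : Int) := by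
        intro x hx
        rw [hcons] at hx
        rcases List.mem_append.mp hx with h | h
        · by_cases hL1 : L = 1
          · rw [if_pos hL1] at h
            have hx01 : x = 0 ∨ x = 1 := by
              split at h <;> simp at h <;> tauto
            rw [hlen]; push_cast
            omega
          · simp [hL1] at h
        · obtain ⟨y, hy, hxy⟩ := List.mem_map.mp h
          obtain ⟨hy0, hy1⟩ := IHbound y hy
          rw [hlen]; push_cast
          omega
      refine ⟨hbound, ?_⟩
      -- keepA part
      have hcontains : ∀ (j : Nat), ((riA (c :: t)).contains ((j : Int)))
          = (decide (L = 1 ∧ j < 2) || (riA rest).contains ((j : Int) - ((L : Int) + 1))) := by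
        intro j
        rw [hcons]
        rw [List.contains_append]
        congr 1
        · -- prefix part
          by_cases hL1 : L = 1
          · subst hL1
            rcases j with _ | _ | j <;> split <;> simp <;> first | omega | (split <;> simp <;> try omega)
          · simp [hL1]
        · -- shifted part
          by_cases hmem : ((j : Int) - ((L : Int) + 1)) ∈ riA rest
          · have : ((j : Int)) ∈ (riA rest).map (· + ((L : Int) + 1)) := by
              refine List.mem_map.mpr ⟨(j : Int) - ((L : Int) + 1), hmem, by ring⟩
            simp [this, hmem]
          · have : ((j : Int)) ∉ (riA rest).map (· + ((L : Int) + 1)) := by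
              intro hc
              obtain ⟨y, hy, hxy⟩ := List.mem_map.mp hc
              exact hmem (by rw [show (j : Int) - ((L : Int) + 1) = y by omega]; exact hy)
            rw [Bool.eq_iff_iff]
            simp only [List.contains_iff_mem]
            tauto
      have hrunrepl : c :: t.takeWhile (· == c) = List.replicate (L + 1) c := by
        rw [List.eq_replicate_iff]
        constructor
        · simp [hLg]
        · intro b hb
          rcases List.mem_cons.mp hb with h | h
          · exact h
          · have := List.mem_takeWhile_imp h
            simpa using this
      have hdecomp : (c :: t) = List.replicate (L + 1) c ++ rest := by
        rw [← hrunrepl, hrestdef]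
        simp [List.takeWhile_append_dropWhile]
      have hfilter1 : (List.range (L + 1)).filter
            (fun (k : Nat) => !((riA (c :: t)).contains ((k : Int))))
          = if L = 1 then [] else List.range (L + 1) := by
        by_cases hL1 : L = 1
        · subst hL1
          rw [if_pos rfl]
          apply List.filter_eq_nil_iff.mpr
          intro j hj
          have hj2 : j < 2 := by simpa using List.mem_range.mp hj
          rw [hcontains j]
          simp [hj2]
        · rw [if_neg hL1]
          apply List.filter_eq_self.mpr
          intro j hj
          have hjlt : j < L + 1 := List.mem_range.mp hj
          rw [hcontains j]
          have hmapf : (riA rest).contains ((j : Int) - ((L : Int) + 1)) = false := by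
            rw [← Bool.not_eq_true, List.contains_iff_mem]
            intro hmem
            have := (IHbound _ hmem).1
            omega
          simp [hL1]
          intro hm
          exact Bool.false_ne_true (hmapf.symm.trans (List.contains_iff_mem.mpr hm))
      have hmap1 : (List.range (L + 1)).map (fun k => (c :: t).getD k ' ')
          = List.replicate (L + 1) c := by
        rw [List.eq_replicate_iff]
        refine ⟨by simp, ?_⟩
        intro b hb
        obtain ⟨j, hj, hjb⟩ := List.mem_map.mp hb
        have hjlt := List.mem_range.mp hj
        rw [hdecomp, List.getD_append _ _ _ _ (by simpa using hjlt),
          List.getD_replicate _ hjlt] at hjb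
        exact hjb.symm
      have e1 : ((List.range (L + 1)).filter
            (fun (k : Nat) => !((riA (c :: t)).contains ((k : Int))))).map
              (fun k => (c :: t).getD k ' ')
          = (if (c :: t.takeWhile (· == c)).length = 2 then []
              else c :: t.takeWhile (· == c)) := by
        rw [hfilter1, hrunrepl]
        by_cases hL1 : L = 1
        · subst hL1
          simp
        · rw [if_neg hL1, if_neg (by simp; omega)]
          exact hmap1
      have e2 : (((List.range rest.length).map (fun x => (L + 1) + x)).filter
            (fun (k : Nat) => !((riA (c :: t)).contains ((k : Int))))).map
              (fun k => (c :: t).getD k ' ')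
          = drGo rest := by
        rw [List.filter_map, List.map_map, ← IHkeep]
        show ((List.range rest.length).filter _).map _ = keepA rest
        rw [keepA]
        rw [List.filter_congr (q := fun (k : Nat) => !((riA rest).contains ((k : Int)))) ?_]
        · apply List.map_congr_left
          intro j hj
          show (c :: t).getD ((L + 1) + j) ' ' = rest.getD j ' '
          rw [hdecomp, List.getD_append_right _ _ _ _ (by simp)]
          simp
        · intro j hj
          simp only [Function.comp_apply]
          rw [hcontains ((L + 1) + j)]
          have hd : decide (L = 1 ∧ (L + 1) + j < 2) = false := by
            simp
            omega
          have hc : (((L + 1) + j : Nat) : Int) - ((L : Int) + 1) = (j : Int) := by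
            push_cast
            ring
          rw [hd, hc]
          simp
      rw [keepA, hlen, List.range_add, List.filter_append, List.map_append, e1, e2, drGo]



theorem portA_eq (input : String) : double_remover input = String.mk (keepA input.toList) := by
  unfold double_remover
  simp only [PySem.Str.len_eq]
  have hloop :
      (PySem.List.pyRange 0 ((input.toList.length : Int) - 1) 1).foldl
        (fun (st : Int × List Int) i =>
          if PySem.List.pyGetD input.toList i ' ' == PySem.List.pyGetD input.toList (i + 1) ' ' then
            (st.1 + 1, st.2)
          else
            (0, if st.1 == 1 then st.2 ++ [i, i - 1] else st.2))
        (0, ([] : List Int)) = loop1 input.toList 0 0 [] := by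
    have h := fold_eq_loop1 input.toList input.toList 0 0 []
      (by intro k hk; simp)
    rw [show (0 : Int) + (input.toList.length : Int) - 1 = (input.toList.length : Int) - 1 by ring] at h
    exact h
  rw [hloop]
  have hri : (if (loop1 input.toList 0 0 []).1 == 1 then
        (loop1 input.toList 0 0 []).2 ++
          [(input.toList.length : Int) - 2, (input.toList.length : Int) - 1]
      else (loop1 input.toList 0 0 []).2) = riA input.toList := rfl
  rw [hri]
  congr 1
  rw [PySem.List.foldl_append_if (fun i => !((riA input.toList).contains i))
    (fun i => PySem.List.pyGetD input.toList i ' ')]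
  rw [PySem.List.pyRange_zero_natCast]
  rw [List.filter_map, List.map_map]
  rw [keepA]
  simp only [List.nil_append, Function.comp_def, PySem.List.pyGetD_natCast]

theorem double_remover_eq_alt (input : String) :
    double_remover input = double_remover_alt input := by
  rw [portA_eq]
  unfold double_remover_alt
  congr 1
  exact (main_invariant input.toList.length input.toList le_rfl).2

-- ===== VERDICT (by name: the statement is the Claim_ definition above) =====
theorem double_remover_spec : Claim_equal_double_remover := by
  intro input _
  exact double_remover_eq_alt input
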